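-- pv_equiv track=rewrite | github.com/GuilloteauQ/study-docker-repro-longevity | analysis/softenv_analysis.py | sources_stats
-- ===== SOURCE A (Python) =====
-- def sources_stats(input_table, pkgsources):
--     """
--     Analyzes the given package lists table to determine the number of artifacts
--     using a package manager, Git packages or misc packages.
--
--     Parameters
--     ----------
--     input_table: str
--         Table to analyse.
--
--     pkgsources: dict
--         A dictionnary that contains all the possible package sources as keys,
--         with all keys' value initialized at 0.
--
--     Returns
--     -------
--     dict
--         Output table of the analysis in the form of a dict with headers as keys.
--     """
--     i = 0
--     for row in input_table:
--         # Third column is the package source: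
--         if row[2] not in pkgsources:
--             pkgsources[row[2]] = 1
--         else:
--             pkgsources[row[2]] += 1
--     return pkgsources
-- ===== SOURCE B (Python) =====
-- def sources_stats(input_table, pkgsources):
--     # Per-key counting instead of row-by-row accumulation: extract the source
--     # column once, then compute each key's total with col.count(k).
--     col = [row[2] for row in input_table]
--     # Existing keys: add this key's number of occurrences in the column.
--     for k in list(pkgsources):
--         pkgsources[k] = pkgsources[k] + col.count(k)
--     # Keys not yet present: first appearance in the column fixes their position.
--     for k in col:
--         if k not in pkgsources:
--             pkgsources[k] = col.count(k)
--     return pkgsources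
-- ===== Notes on version B (the rewrite author's own statement) =====
-- stated objective: alternative
-- what changed: Replaces A's single row-by-row accumulate loop with a per-key counting algorithm: extract the source column once, then for each existing key add col.count(k), and for each new key (in first-occurrence order) set col.count(k) -- no running accumulator at all.
import Mathlib
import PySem

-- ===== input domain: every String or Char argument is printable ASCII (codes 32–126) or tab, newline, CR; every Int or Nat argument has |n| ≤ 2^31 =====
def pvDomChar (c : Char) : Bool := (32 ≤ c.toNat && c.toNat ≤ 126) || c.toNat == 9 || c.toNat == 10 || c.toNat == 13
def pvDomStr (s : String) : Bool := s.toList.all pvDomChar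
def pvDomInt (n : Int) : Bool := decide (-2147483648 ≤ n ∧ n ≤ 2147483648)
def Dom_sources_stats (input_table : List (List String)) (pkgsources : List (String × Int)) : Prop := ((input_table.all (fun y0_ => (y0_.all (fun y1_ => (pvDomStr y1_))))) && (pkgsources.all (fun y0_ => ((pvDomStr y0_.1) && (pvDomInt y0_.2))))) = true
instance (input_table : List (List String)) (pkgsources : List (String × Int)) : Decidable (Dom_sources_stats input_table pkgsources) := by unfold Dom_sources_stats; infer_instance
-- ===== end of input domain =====

-- B replaces A's single accumulate-into-the-output loop by a per-key counting
-- algorithm (extract the source column once, then obtain each key's total with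
-- col.count(k)); equivalence is about the RETURN value (Python A and B both
-- mutate the caller's dict into the same final state).


-- ===== PORT A =====
-- for row in input_table: if row[2] not in pkgsources: pkgsources[row[2]] = 1 else: pkgsources[row[2]] += 1
def sources_stats (input_table : List (List String)) (pkgsources : List (String × Int)) : List (String × Int) :=
  (input_table.foldl
    (fun d row =>
      let k := (PySem.List.pyGet? row 2).getD ""   -- row[2]; IndexError (none) excluded by Pre_
      if d.contains k = false then d.insert k 1 else d.modify k 0 (· + 1))
    (PySem.Dict.ofList pkgsources)).items

-- ===== PORT B =====
-- col = [row[2] for row in input_table]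
-- for k in list(pkgsources): pkgsources[k] = pkgsources[k] + col.count(k)
-- for k in col: if k not in pkgsources: pkgsources[k] = col.count(k)
def sources_stats_alt (input_table : List (List String)) (pkgsources : List (String × Int)) : List (String × Int) :=
  let col := input_table.map (fun row => (PySem.List.pyGet? row 2).getD "")   -- row[2]; IndexError excluded by Pre_
  let d0 := PySem.Dict.ofList pkgsources
  let d1 := d0.keys.foldl
    (fun d k => d.insert k (d.getD k 0 + (PySem.List.count col k : Int)))   -- pkgsources[k]: k is a key, getD never defaults
    d0
  (col.foldl
    (fun d k => if d.contains k = true then d else d.insert k ((PySem.List.count col k : Int)))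
    d1).items

-- ===== PRECONDITION & SPEC =====
-- Pre_: every row must have a third column, otherwise Python's row[2] raises IndexError in A (and in B).
def Pre_sources_stats (input_table : List (List String)) (pkgsources : List (String × Int)) : Prop :=
  ∀ row ∈ input_table, 3 ≤ row.length
instance (input_table : List (List String)) (pkgsources : List (String × Int)) : Decidable (Pre_sources_stats input_table pkgsources) := by unfold Pre_sources_stats; infer_instance
def pvWitness_sources_stats : List (List String) × (List (String × Int)) :=
  ([["a", "b", "pip"], ["c", "d", "git"], ["e", "f", "pip"]], [("pip", 0), ("git", 0), ("misc", 0)])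

def Spec_sources_stats (input_table : List (List String)) (pkgsources : List (String × Int)) (out : List (String × Int)) : Prop := out = sources_stats_alt input_table pkgsources
instance (input_table : List (List String)) (pkgsources : List (String × Int)) (out : List (String × Int)) : Decidable (Spec_sources_stats input_table pkgsources out) := by unfold Spec_sources_stats; infer_instance

-- ===== CLAIM (what is proved, stated in full; the proofs are below) =====
def Claim_equal_sources_stats : Prop := ∀ (input_table : List (List String)) (pkgsources : List (String × Int)), Dom_sources_stats input_table pkgsources → Pre_sources_stats input_table pkgsources → Spec_sources_stats input_table pkgsources (sources_stats input_table pkgsources)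

-- ===== LEMMAS AND PROOFS =====

-- A's guarded per-row step is an unconditional "insert key (old + 1)"
theorem pvAstep_eq (d : PySem.Dict String Int) (k : String) :
    (if d.contains k = false then d.insert k 1 else d.modify k 0 (· + 1))
      = d.insert k (d.getD k 0 + 1) := by
  by_cases h : d.contains k = false
  · rw [if_pos h, PySem.Dict.getD_of_not_contains _ _ h]
    norm_num
  · rw [if_neg h]
    rfl

-- Set.update by elements already present is the identity
theorem pvSetUpdate_of_subset (L : List String) :
    ∀ s : PySem.Set String, (∀ x ∈ L, x ∈ s) → PySem.Set.update s L = s := by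
  induction L with
  | nil => intro s _; rfl
  | cons x xs ih =>
    intro s h
    rw [PySem.Set.update_cons, PySem.Set.add_of_mem (h x (List.mem_cons_self)),
        ih s (fun y hy => h y (List.mem_cons_of_mem _ hy))]

-- B's pass 1 (over a Nodup key list): getD afterwards
theorem pvPass1_getD (f : String → Int) (v : String) (L : List String) :
    ∀ d : PySem.Dict String Int, L.Nodup →
    (L.foldl (fun d k => d.insert k (d.getD k 0 + f k)) d).getD v 0
      = d.getD v 0 + (if v ∈ L then f v else 0) := by
  induction L with
  | nil => intro d _; simp
  | cons k rest ih =>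
    intro d hnd
    rw [List.nodup_cons] at hnd
    rw [List.foldl_cons, ih _ hnd.2]
    by_cases hv : v = k
    · subst hv
      rw [if_neg hnd.1, PySem.Dict.getD_insert_self, if_pos List.mem_cons_self]
      ring
    · rw [PySem.Dict.getD_insert_of_ne _ _ _ hv]
      simp [List.mem_cons, hv]

-- B's pass 2 (conditional insert of fresh keys): getD afterwards
theorem pvPass2_getD (f : String → Int) (v : String) (col : List String) :
    ∀ d : PySem.Dict String Int,
    (col.foldl (fun d k => if d.contains k = true then d else d.insert k (f k)) d).getD v 0
      = if v ∈ d.keys then d.getD v 0 else if v ∈ col then f v else 0 := by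
  induction col with
  | nil =>
    intro d
    by_cases h : v ∈ d.keys
    · simp [h]
    · have hc : d.contains v = false := by
        cases hcv : d.contains v
        · rfl
        · exact absurd ((PySem.Dict.contains_iff_mem_keys d v).mp hcv) h
      simp only [List.foldl_nil]
      rw [PySem.Dict.getD_of_not_contains _ _ hc]
      simp [h]
  | cons k rest ih =>
    intro d
    rw [List.foldl_cons]
    by_cases hc : d.contains k = true
    · rw [if_pos hc, ih d]
      by_cases hv : v ∈ d.keys
      · simp [hv]
      · have hvk : v ≠ k := fun h => hv (h ▸ (PySem.Dict.contains_iff_mem_keys d k).mp hc)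
        simp [hv, List.mem_cons, hvk]
    · have hc' : d.contains k = false := by simpa using hc
      rw [if_neg hc, ih _]
      have hkeys : (d.insert k (f k)).keys = d.keys ++ [k] :=
        PySem.Dict.keys_insert_of_not_contains d _ hc'
      have hkmem : k ∉ d.keys := fun h => by
        rw [(PySem.Dict.contains_iff_mem_keys d k).mpr h] at hc'; exact absurd hc' (by simp)
      by_cases hv : v = k
      · subst hv
        rw [hkeys, if_pos (by simp), PySem.Dict.getD_insert_self,
            if_neg hkmem, if_pos List.mem_cons_self]
      · rw [hkeys, PySem.Dict.getD_insert_of_ne _ _ _ hv]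
        simp [List.mem_append, List.mem_cons, hv]

-- B's pass 2: keys afterwards (fresh keys append in first-occurrence order)
theorem pvPass2_keys (f : String → Int) (col : List String) :
    ∀ d : PySem.Dict String Int,
    (col.foldl (fun d k => if d.contains k = true then d else d.insert k (f k)) d).keys
      = PySem.Set.update d.keys col := by
  induction col with
  | nil => intro d; rfl
  | cons k rest ih =>
    intro d
    rw [List.foldl_cons, PySem.Set.update_cons]
    by_cases hc : d.contains k = true
    · rw [if_pos hc, ih d, PySem.Set.add_of_mem ((PySem.Dict.contains_iff_mem_keys d k).mp hc)]
    · have hc' : d.contains k = false := by simpa using hc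
      have hkmem : k ∉ d.keys := fun h => by
        rw [(PySem.Dict.contains_iff_mem_keys d k).mpr h] at hc'; exact absurd hc' (by simp)
      rw [if_neg hc, ih _, PySem.Dict.keys_insert_of_not_contains d _ hc',
          PySem.Set.add_of_not_mem hkmem]

theorem sources_stats_eq (t : List (List String)) (ps : List (String × Int)) :
    sources_stats t ps = sources_stats_alt t ps := by
  unfold sources_stats sources_stats_alt
  simp only []
  set col := t.map (fun row => (PySem.List.pyGet? row 2).getD "") with hcol
  set d0 := PySem.Dict.ofList ps with hd0
  have hAfold : (t.foldl
      (fun d row =>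
        let k := (PySem.List.pyGet? row 2).getD ""
        if d.contains k = false then d.insert k 1 else d.modify k 0 (· + 1))
      d0)
      = col.foldl (fun d k => d.insert k (d.getD k 0 + 1)) d0 := by
    rw [hcol, List.foldl_map]
    apply PySem.List.foldl_congr_mem
    intro d row _
    exact pvAstep_eq d _
  rw [hAfold]
  set Ad := col.foldl (fun d k => d.insert k (d.getD k 0 + 1)) d0 with hAd
  set d1 := d0.keys.foldl
    (fun d k => d.insert k (d.getD k 0 + (PySem.List.count col k : Int))) d0 with hd1
  set Bd := col.foldl
    (fun d k => if d.contains k = true then d else d.insert k ((PySem.List.count col k : Int))) d1 with hBd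
  have hnd0 : d0.keys.Nodup := PySem.Dict.nodup_keys_ofList ps
  have hAk : Ad.keys = PySem.Set.update d0.keys col :=
    PySem.Dict.keys_foldl_insert col (fun d k => d.getD k 0 + 1) d0
  have hd1k : d1.keys = d0.keys := by
    rw [hd1, PySem.Dict.keys_foldl_insert]
    exact pvSetUpdate_of_subset d0.keys d0.keys (fun x h => h)
  have hBk : Bd.keys = PySem.Set.update d0.keys col := by
    rw [hBd, pvPass2_keys, hd1k]
  have hnd : (PySem.Set.update d0.keys col).Nodup := PySem.Set.nodup_update d0.keys col hnd0
  have hgetD : ∀ v, Ad.getD v 0 = Bd.getD v 0 := by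
    intro v
    have hA : Ad.getD v 0 = d0.getD v 0 + (List.count v col : Int) :=
      PySem.Dict.getD_foldl_insert_add_one col d0 v
    have hB := pvPass2_getD (fun k => (PySem.List.count col k : Int)) v col d1
    have hp1 := pvPass1_getD (fun k => (PySem.List.count col k : Int)) v d0.keys d0 hnd0
    simp only [] at hB hp1
    rw [hA, hB, hd1k]
    by_cases hv : v ∈ d0.keys
    · rw [if_pos hv, hp1, if_pos hv, PySem.List.count_eq]
    · rw [if_neg hv]
      have hc : d0.contains v = false := by
        cases hcv : d0.contains v
        · rfl
        · exact absurd ((PySem.Dict.contains_iff_mem_keys d0 v).mp hcv) hv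
      rw [PySem.Dict.getD_of_not_contains _ _ hc]
      by_cases hvc : v ∈ col
      · rw [if_pos hvc, PySem.List.count_eq, zero_add]
      · rw [if_neg hvc, List.count_eq_zero.mpr hvc]
        simp
  rw [PySem.Dict.items_eq_map_keys Ad (hAk ▸ hnd) 0,
      PySem.Dict.items_eq_map_keys Bd (hBk ▸ hnd) 0, hAk, hBk]
  exact List.map_congr_left (fun v _ => by rw [hgetD v])

-- ===== VERDICT (by name: the statement is the Claim_ definition above) =====
theorem sources_stats_spec : Claim_equal_sources_stats := by
  intro t ps _ _
  unfold Spec_sources_stats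
  exact sources_stats_eq t ps
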